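-- pv_equiv track=rewrite | github.com/leongdl/scratchspace | vray/find_missing_deps.py | filter_bundled_libs
-- ===== SOURCE A (Python) =====
-- from typing import List
--
-- def filter_bundled_libs(libs: List[str], exclude_patterns: List[str]) -> List[str]:
--     """Filter out libraries that are bundled with the application."""
--     filtered = []
--     for lib in libs:
--         exclude = False
--         for pattern in exclude_patterns:
--             if lib.startswith(pattern):
--                 exclude = True
--                 break
--         if not exclude:
--             filtered.append(lib)
--     return filtered
-- ===== SOURCE B (Python) =====
-- def filter_bundled_libs(libs, exclude_patterns):
--     """Filter out libraries that are bundled with the application."""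
--     remaining = list(libs)
--     for pattern in exclude_patterns:
--         remaining = [lib for lib in remaining if not lib.startswith(pattern)]
--     return remaining
-- ===== Notes on version B (the rewrite author's own statement) =====
-- stated objective: alternative
-- what changed: Loop order is swapped: instead of scanning all patterns for each lib (with an exclude flag and break), B successively filters the surviving lib list once per pattern, shrinking it as patterns match.
import Mathlib
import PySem

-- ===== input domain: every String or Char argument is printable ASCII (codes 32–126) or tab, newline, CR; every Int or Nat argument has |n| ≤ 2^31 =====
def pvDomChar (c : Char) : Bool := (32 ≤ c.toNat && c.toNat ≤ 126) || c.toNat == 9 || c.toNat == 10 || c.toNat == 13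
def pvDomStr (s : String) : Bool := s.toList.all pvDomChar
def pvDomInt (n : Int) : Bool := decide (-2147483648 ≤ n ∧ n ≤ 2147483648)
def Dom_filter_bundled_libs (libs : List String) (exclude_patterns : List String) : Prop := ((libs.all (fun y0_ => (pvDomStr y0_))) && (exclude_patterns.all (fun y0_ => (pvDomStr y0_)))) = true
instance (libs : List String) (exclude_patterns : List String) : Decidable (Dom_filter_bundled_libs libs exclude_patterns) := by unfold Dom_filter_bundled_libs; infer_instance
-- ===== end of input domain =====

-- B swaps the loop order: one pass over the lib list per pattern, shrinking the list; objective: alternative.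
-- ===== PORT A =====
def pvAnyPrefix (lib : String) : List String → Bool
  | [] => false
  | p :: ps => if PySem.Str.startswith lib p then true else pvAnyPrefix lib ps

def filter_bundled_libs (libs : List String) (exclude_patterns : List String) : List String :=
  libs.foldl (fun filtered lib =>
    if !(pvAnyPrefix lib exclude_patterns) then filtered ++ [lib] else filtered) []

-- ===== PORT B =====
def filter_bundled_libs_alt (libs : List String) (exclude_patterns : List String) : List String :=
  exclude_patterns.foldl
    (fun remaining pattern => remaining.filter (fun lib => !(PySem.Str.startswith lib pattern))) libs

-- ===== PRECONDITION & SPEC =====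
def Spec_filter_bundled_libs (libs : List String) (exclude_patterns : List String) (out : List String) : Prop := out = filter_bundled_libs_alt libs exclude_patterns
instance (libs : List String) (exclude_patterns : List String) (out : List String) : Decidable (Spec_filter_bundled_libs libs exclude_patterns out) := by unfold Spec_filter_bundled_libs; infer_instance

-- ===== CLAIM =====
def Claim_equal_filter_bundled_libs : Prop := ∀ (libs : List String) (exclude_patterns : List String), Dom_filter_bundled_libs libs exclude_patterns → Spec_filter_bundled_libs libs exclude_patterns (filter_bundled_libs libs exclude_patterns)

-- ===== LEMMAS AND PROOFS =====
theorem pvAnyPrefix_eq_any (lib : String) (ps : List String) :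
    pvAnyPrefix lib ps = ps.any (fun p => PySem.Str.startswith lib p) := by
  induction ps with
  | nil => rfl
  | cons p ps ih =>
    unfold pvAnyPrefix
    rw [List.any_cons, ih]
    cases PySem.Str.startswith lib p <;> simp

theorem portA_eq_filter (libs ps : List String) :
    filter_bundled_libs libs ps = libs.filter (fun lib => !(pvAnyPrefix lib ps)) := by
  unfold filter_bundled_libs
  simpa using PySem.List.foldl_append_if_eq_filter (fun lib => !(pvAnyPrefix lib ps)) libs []

theorem portB_eq_filter (ps libs : List String) :
    filter_bundled_libs_alt libs ps = libs.filter (fun lib => ps.all (fun p => !(PySem.Str.startswith lib p))) := by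
  induction ps generalizing libs with
  | nil => simp [filter_bundled_libs_alt]
  | cons p ps ih =>
    show filter_bundled_libs_alt (libs.filter (fun lib => !(PySem.Str.startswith lib p))) ps = _
    rw [ih, List.filter_filter]
    apply List.filter_congr
    intro lib _
    simp [Bool.and_comm]

-- ===== VERDICT =====
theorem filter_bundled_libs_spec : Claim_equal_filter_bundled_libs := by
  intro libs ps _
  unfold Spec_filter_bundled_libs
  rw [portA_eq_filter, portB_eq_filter]
  apply List.filter_congr
  intro lib _
  simp [pvAnyPrefix_eq_any, List.all_eq_not_any_not]
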